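-- pv_equiv track=rewrite | github.com/doomnonius/codeclass | week-5/connect4.py | removeUseless
-- ===== SOURCE A (Python) =====
-- def removeUseless(S):
--   """Removes commas from a string.
--   """
--   if len(S) == 0:
--     return ''
--   if str(S[0]) in '1234567890':
--     return str(S[0]) + removeUseless(S[1:])
--   elif S[0] == ' ':
--       return ' ' + removeUseless(S[1:])
--   else:
--     return '' + removeUseless(S[1:])
-- ===== SOURCE B (Python) =====
-- def removeUseless(S):
--   """Removes commas from a string (keeps only digits and spaces)."""
--   result = ''
--   for c in S:
--     if c in '1234567890':
--       result += c
--     elif c == ' ':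
--       result += ' '
--   return result
-- ===== Notes on version B (the rewrite author's own statement) =====
-- stated objective: faster
-- what changed: Replaced A's recursion that rebuilds the remaining string with S[1:] at every step by a single iterative loop over the characters with a string accumulator.
import Mathlib
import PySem

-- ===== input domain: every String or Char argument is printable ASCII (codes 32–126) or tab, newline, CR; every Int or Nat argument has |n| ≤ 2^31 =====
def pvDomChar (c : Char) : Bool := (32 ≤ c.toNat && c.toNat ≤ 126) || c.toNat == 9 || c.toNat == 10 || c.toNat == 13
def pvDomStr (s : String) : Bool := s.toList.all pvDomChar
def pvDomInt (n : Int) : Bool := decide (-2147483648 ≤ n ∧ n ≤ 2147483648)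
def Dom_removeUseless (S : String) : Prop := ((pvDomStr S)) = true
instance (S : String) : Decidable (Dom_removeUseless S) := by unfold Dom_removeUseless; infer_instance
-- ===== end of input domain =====

-- ===== PORT A =====
-- header: B replaces A's slicing recursion by one iterative loop with an accumulator (simpler); return values proved equal on Dom.
-- literal recursion on the character list: S[0] is the head, S[1:] the tail
def removeUselessA (l : List Char) : List Char :=
  match l with
  | [] => []
  | c :: rest =>
    if c ∈ "1234567890".toList then c :: removeUselessA rest
    else if c = ' ' then ' ' :: removeUselessA rest
    else removeUselessA rest

def removeUseless (S : String) : String := String.mk (removeUselessA S.toList)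

-- ===== PORT B =====
-- Source B's loop: fold over the characters, appending to the accumulated result
def removeUselessB (acc : List Char) (c : Char) : List Char :=
  if c ∈ "1234567890".toList then acc ++ [c]
  else if c = ' ' then acc ++ [' ']
  else acc

def removeUseless_alt (S : String) : String := String.mk (S.toList.foldl removeUselessB [])

-- ===== PRECONDITION & SPEC =====
def Spec_removeUseless (S : String) (out : String) : Prop := out = removeUseless_alt S
instance (S : String) (out : String) : Decidable (Spec_removeUseless S out) := by unfold Spec_removeUseless; infer_instance

-- ===== CLAIM (what is proved, stated in full; the proofs are below) =====
def Claim_equal_removeUseless : Prop := ∀ (S : String), Dom_removeUseless S → Spec_removeUseless S (removeUseless S)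

-- ===== LEMMAS AND PROOFS =====

lemma foldl_removeUselessB (l : List Char) (acc : List Char) :
    l.foldl removeUselessB acc = acc ++ removeUselessA l := by
  induction l generalizing acc with
  | nil => simp [removeUselessA]
  | cons c rest ih =>
    simp only [List.foldl_cons, removeUselessB, removeUselessA]
    split_ifs <;> simp [ih]

-- ===== VERDICT (by name: the statement is the Claim_ definition above) =====
theorem removeUseless_spec : Claim_equal_removeUseless := by
  intro S _
  unfold Spec_removeUseless removeUseless removeUseless_alt
  rw [foldl_removeUselessB]
  simp
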